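-- pv_equiv track=rewrite | github.com/AstroHeyang/CodingForInterview | 001-马贼分金/get_max_gold.py | get_max_gold
-- ===== SOURCE A (Python) =====
-- def get_max_gold(array):
--     if not array:
--         return 0
--     golds = [[0 for _ in range(len(array))] for _ in range(len(array))]
--     for i in range(len(array)):
--         golds[i][i] = array[i]
--
--     for interval in range(1, len(array)):
--         for left in range(len(array) - interval):
--             right = left + interval
--             golds[left][right] = sum(array[left:right + 1]) - \
--                                  min(golds[left + 1][right], golds[left][right - 1])
--     return golds[0][len(array) - 1]
-- ===== SOURCE B (Python) =====
-- def get_max_gold(array):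
--     # Interval DP with prefix sums and a rolling 1D diagonal: O(n^2) time, O(n) space.
--     n = len(array)
--     if n == 0:
--         return 0
--     prefix = [0]
--     for x in array:
--         prefix.append(prefix[-1] + x)
--     cur = list(array)  # cur[l] = best for interval [l, l+k]
--     for k in range(1, n):
--         cur = [prefix[l + k + 1] - prefix[l] - min(cur[l + 1], cur[l])
--                for l in range(n - k)]
--     return cur[0]
-- ===== Notes on version B (the rewrite author's own statement) =====
-- stated objective: faster
-- what changed: Replaces the O(n^3) interval DP (full 2D table with a fresh slice-sum per cell) by an O(n^2)/O(n)-space DP: prefix sums give each interval sum in O(1) and only the current anti-diagonal of the table is kept as a rolling 1D list.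
import Mathlib
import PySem

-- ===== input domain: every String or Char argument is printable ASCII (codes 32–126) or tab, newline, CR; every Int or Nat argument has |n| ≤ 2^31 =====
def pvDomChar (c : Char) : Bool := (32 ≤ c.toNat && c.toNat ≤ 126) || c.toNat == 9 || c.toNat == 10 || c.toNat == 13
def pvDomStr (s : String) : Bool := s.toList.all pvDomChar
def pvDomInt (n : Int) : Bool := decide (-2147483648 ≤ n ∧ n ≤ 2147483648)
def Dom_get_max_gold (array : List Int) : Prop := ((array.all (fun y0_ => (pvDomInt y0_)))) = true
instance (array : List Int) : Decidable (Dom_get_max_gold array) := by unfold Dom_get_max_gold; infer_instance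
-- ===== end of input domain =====

-- B replaces A's O(n^3) 2D-table DP by an O(n^2) rolling-diagonal DP with prefix sums.

-- ===== PORT A =====
-- golds[i][j] read / write on the nested list (indices are always in range in A)
def get2 (m : List (List Int)) (i j : Nat) : Int := (m.getD i []).getD j 0
def set2 (m : List (List Int)) (i j : Nat) (v : Int) : List (List Int) :=
  m.set i ((m.getD i []).set j v)

def get_max_gold (array : List Int) : Int :=
  if array = [] then 0
  else
    let n := array.length
    -- golds = [[0 for _ in range(n)] for _ in range(n)]
    let golds := List.replicate n (List.replicate n (0 : Int))
    -- for i in range(n): golds[i][i] = array[i]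
    let golds := (List.range n).foldl (fun g i => set2 g i i (array.getD i 0)) golds
    -- for interval in range(1, n): for left in range(n - interval): …
    let golds := (List.range' 1 (n - 1)).foldl (fun g interval =>
      (List.range (n - interval)).foldl (fun g left =>
        let right := left + interval
        set2 g left right
          ((PySem.List.slice array (some (left : Int)) (some ((right : Int) + 1))).sum -
            min (get2 g (left + 1) right) (get2 g left (right - 1)))) g) golds
    get2 golds 0 (n - 1)

-- ===== PORT B =====
def get_max_gold_alt (array : List Int) : Int :=
  let n := array.length
  if n = 0 then 0
  else
    -- prefix = [0]; for x in array: prefix.append(prefix[-1] + x)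
    -- (prefix[-1] = last element; prefix is never empty, so getLastD is exact)
    let pre := array.foldl (fun acc x => acc ++ [acc.getLastD 0 + x]) [(0 : Int)]
    let cur := array
    -- for k in range(1, n): cur = [prefix[l+k+1]-prefix[l] - min(cur[l+1], cur[l]) for l in range(n-k)]
    let cur := (List.range' 1 (n - 1)).foldl (fun cur k =>
      (List.range (n - k)).map (fun l =>
        pre.getD (l + k + 1) 0 - pre.getD l 0 -
          min (cur.getD (l + 1) 0) (cur.getD l 0))) cur
    cur.getD 0 0

-- ===== PRECONDITION & SPEC =====
def Spec_get_max_gold (array : List Int) (out : Int) : Prop := out = get_max_gold_alt array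
instance (array : List Int) (out : Int) : Decidable (Spec_get_max_gold array out) := by unfold Spec_get_max_gold; infer_instance

-- ===== CLAIM (what is proved, stated in full; the proofs are below) =====
def Claim_equal_get_max_gold : Prop := ∀ (array : List Int), Dom_get_max_gold array → Spec_get_max_gold array (get_max_gold array)

-- ===== LEMMAS AND PROOFS =====

-- the mathematical interval-DP value both programs compute
def gspec (a : List Int) (i j : Nat) : Int :=
  if j ≤ i then a.getD i 0
  else ((a.drop i).take (j + 1 - i)).sum - min (gspec a (i + 1) j) (gspec a i (j - 1))
termination_by j - i
decreasing_by all_goals omega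

theorem gspec_diag (a : List Int) (i : Nat) : gspec a i i = a.getD i 0 := by
  rw [gspec]; simp

theorem gspec_rec (a : List Int) (i j : Nat) (h : i < j) :
    gspec a i j = ((a.drop i).take (j + 1 - i)).sum - min (gspec a (i + 1) j) (gspec a i (j - 1)) := by
  rw [gspec, if_neg (by omega)]

-- the table always stays an n × n matrix
def Shape (n : Nat) (m : List (List Int)) : Prop :=
  m.length = n ∧ ∀ i, i < n → (m.getD i []).length = n

theorem shape_replicate (n : Nat) : Shape n (List.replicate n (List.replicate n (0 : Int))) := by
  constructor
  · simp
  · intro i hi; simp [List.getD, hi]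

theorem shape_set2 (n : Nat) (m : List (List Int)) (i j : Nat) (v : Int)
    (h : Shape n m) : Shape n (set2 m i j v) := by
  obtain ⟨h1, h2⟩ := h
  refine ⟨by simp [set2, h1], fun i' hi' => ?_⟩
  by_cases hii : i' = i
  · subst hii
    rw [set2, List.getD, List.getElem?_set_self (by omega), Option.getD_some, List.length_set]
    exact h2 i' hi'
  · rw [set2, List.getD, List.getElem?_set_ne (by omega)]
    exact h2 i' hi'

theorem getD_set_self (m : List (List Int)) (i : Nat) (r : List Int) (h : i < m.length) :
    (m.set i r).getD i [] = r := by
  simp [List.getD, h]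

theorem get2_set2_same (n : Nat) (m : List (List Int)) (i j : Nat) (v : Int)
    (h : Shape n m) (hi : i < n) (hj : j < n) : get2 (set2 m i j v) i j = v := by
  obtain ⟨h1, h2⟩ := h
  rw [get2, set2, getD_set_self m i _ (by omega)]
  have hjlen : j < (m.getD i []).length := by rw [h2 i hi]; omega
  simp only [List.getD] at hjlen ⊢
  rw [List.getElem?_set_self (by simpa using hjlen), Option.getD_some]

theorem get2_set2_ne (m : List (List Int)) (i j : Nat) (v : Int) (i' j' : Nat)
    (h : ¬(i' = i ∧ j' = j)) : get2 (set2 m i j v) i' j' = get2 m i' j' := by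
  by_cases hii : i' = i
  · subst hii
    have hjj : j' ≠ j := fun hj => h ⟨rfl, hj⟩
    by_cases hlen : i' < m.length
    · rw [get2, set2, getD_set_self m i' _ (by omega), get2]
      simp only [List.getD]
      rw [List.getElem?_set_ne (show j ≠ j' by omega)]
    · rw [set2, List.set_eq_of_length_le (by omega)]
  · rw [get2, set2, get2]
    simp only [List.getD]
    rw [List.getElem?_set_ne (show i ≠ i' by omega)]

-- invariant: all intervals of length ≤ K are filled with the DP values
def Pinv (a : List Int) (K : Nat) (g : List (List Int)) : Prop :=
  ∀ l k, k ≤ K → l + k < a.length → get2 g l (l + k) = gspec a l (l + k)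

theorem initA (a : List Int) (n m : Nat) (g : List (List Int)) (hsh : Shape n g) :
    Shape n ((List.range m).foldl (fun g i => set2 g i i (a.getD i 0)) g) ∧
    ∀ i j, i < n → j < n →
      get2 ((List.range m).foldl (fun g i => set2 g i i (a.getD i 0)) g) i j =
        if i = j ∧ i < m then a.getD i 0 else get2 g i j := by
  induction m with
  | zero => exact ⟨hsh, by simp⟩
  | succ m ih =>
    obtain ⟨ihS, ihE⟩ := ih
    rw [List.range_succ, List.foldl_append, List.foldl_cons, List.foldl_nil]
    refine ⟨shape_set2 _ _ _ _ _ ihS, fun i j hi hj => ?_⟩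
    by_cases h : i = m ∧ j = m
    · obtain ⟨h1, h2⟩ := h; subst h1; subst h2
      rw [get2_set2_same n _ _ _ _ ihS hi hj, if_pos ⟨rfl, by omega⟩]
    · rw [get2_set2_ne _ _ _ _ _ _ h, ihE i j hi hj]
      split_ifs <;> first | rfl | omega

theorem innerA (a : List Int) (I : Nat) (hI : 1 ≤ I) (g : List (List Int))
    (hsh : Shape a.length g) (hg : Pinv a (I - 1) g) (m : Nat) (hm : m + I ≤ a.length) :
    Shape a.length ((List.range m).foldl (fun g left =>
        set2 g left (left + I)
          ((PySem.List.slice a (some (left : Int)) (some ((left + I : Nat) + 1 : Int))).sum -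
            min (get2 g (left + 1) (left + I)) (get2 g left (left + I - 1)))) g) ∧
    Pinv a (I - 1) ((List.range m).foldl (fun g left =>
        set2 g left (left + I)
          ((PySem.List.slice a (some (left : Int)) (some ((left + I : Nat) + 1 : Int))).sum -
            min (get2 g (left + 1) (left + I)) (get2 g left (left + I - 1)))) g) ∧
    ∀ l, l < m → get2 ((List.range m).foldl (fun g left =>
        set2 g left (left + I)
          ((PySem.List.slice a (some (left : Int)) (some ((left + I : Nat) + 1 : Int))).sum -
            min (get2 g (left + 1) (left + I)) (get2 g left (left + I - 1)))) g) l (l + I)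
      = gspec a l (l + I) := by
  induction m with
  | zero => exact ⟨hsh, hg, by omega⟩
  | succ m ih =>
    have hm' : m + I ≤ a.length := by omega
    obtain ⟨ihS, ihP, ihE⟩ := ih hm'
    rw [List.range_succ, List.foldl_append, List.foldl_cons, List.foldl_nil]
    set gm := (List.range m).foldl (fun g left =>
        set2 g left (left + I)
          ((PySem.List.slice a (some (left : Int)) (some ((left + I : Nat) + 1 : Int))).sum -
            min (get2 g (left + 1) (left + I)) (get2 g left (left + I - 1)))) g with hgm
    have hnew : get2 (set2 gm m (m + I)
        ((PySem.List.slice a (some (m : Int)) (some ((m + I : Nat) + 1 : Int))).sum -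
          min (get2 gm (m + 1) (m + I)) (get2 gm m (m + I - 1)))) m (m + I)
        = gspec a m (m + I) := by
      rw [get2_set2_same a.length _ _ _ _ ihS (by omega) (by omega)]
      have h1 : get2 gm (m + 1) (m + I) = gspec a (m + 1) (m + I) := by
        have := ihP (m + 1) (I - 1) (le_refl _) (by omega)
        rw [show m + 1 + (I - 1) = m + I by omega] at this; exact this
      have h2 : get2 gm m (m + I - 1) = gspec a m (m + I - 1) := by
        have := ihP m (I - 1) (le_refl _) (by omega)
        rw [show m + (I - 1) = m + I - 1 by omega] at this; exact this
      have hs : ((m + I : Nat) + 1 : Int) = (((m + I + 1 : Nat) : Int)) := by push_cast; ring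
      rw [hs, PySem.List.slice_natCast, h1, h2, gspec_rec a m (m + I) (by omega)]
    refine ⟨shape_set2 _ _ _ _ _ ihS, fun l k hk hl => ?_, fun l hl => ?_⟩
    · rw [get2_set2_ne _ _ _ _ _ _ (by omega), ihP l k hk hl]
    · by_cases hlm : l = m
      · subst hlm; exact hnew
      · rw [get2_set2_ne _ _ _ _ _ _ (by omega)]
        exact ihE l (by omega)

theorem outerA (a : List Int) (K : Nat) (hK : K + 1 ≤ a.length) :
    Shape a.length ((List.range' 1 K).foldl (fun g interval =>
      (List.range (a.length - interval)).foldl (fun g left =>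
        set2 g left (left + interval)
          ((PySem.List.slice a (some (left : Int)) (some ((left + interval : Nat) + 1 : Int))).sum -
            min (get2 g (left + 1) (left + interval)) (get2 g left (left + interval - 1)))) g)
      ((List.range a.length).foldl (fun g i => set2 g i i (a.getD i 0))
        (List.replicate a.length (List.replicate a.length (0 : Int))))) ∧
    Pinv a K ((List.range' 1 K).foldl (fun g interval =>
      (List.range (a.length - interval)).foldl (fun g left =>
        set2 g left (left + interval)
          ((PySem.List.slice a (some (left : Int)) (some ((left + interval : Nat) + 1 : Int))).sum -
            min (get2 g (left + 1) (left + interval)) (get2 g left (left + interval - 1)))) g)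
      ((List.range a.length).foldl (fun g i => set2 g i i (a.getD i 0))
        (List.replicate a.length (List.replicate a.length (0 : Int))))) := by
  induction K with
  | zero =>
    obtain ⟨hS, hE⟩ := initA a a.length a.length
      (List.replicate a.length (List.replicate a.length (0 : Int))) (shape_replicate a.length)
    rw [List.range'_zero, List.foldl_nil]
    refine ⟨hS, fun l k hk hl => ?_⟩
    interval_cases k
    rw [Nat.add_zero] at hl ⊢
    rw [hE l l hl hl, if_pos ⟨rfl, hl⟩, gspec_diag]
  | succ K ih =>
    obtain ⟨ihS, ihP⟩ := ih (by omega)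
    rw [List.range'_1_concat, List.foldl_append, List.foldl_cons, List.foldl_nil]
    set gK := (List.range' 1 K).foldl _ _
    have hinner := innerA a (1 + K) (by omega) gK ihS (by simpa using ihP)
      (a.length - (1 + K)) (by omega)
    refine ⟨hinner.1, fun l k hk hl => ?_⟩
    rcases Nat.lt_or_ge k (K + 1) with hk' | hk'
    · have := hinner.2.1 l k (by omega) hl
      simpa using this
    · have hkk : k = 1 + K := by omega
      subst hkk
      have := hinner.2.2 l (by omega)
      simpa using this

def psums (s : Int) : List Int → List Int
  | [] => []
  | x :: xs => (s + x) :: psums (s + x) xs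

theorem foldl_psums (l : List Int) : ∀ acc : List Int, acc ≠ [] →
    l.foldl (fun acc x => acc ++ [acc.getLastD 0 + x]) acc = acc ++ psums (acc.getLastD 0) l := by
  induction l with
  | nil => intro acc _; simp [psums]
  | cons x xs ih =>
    intro acc hacc
    rw [List.foldl_cons, ih (acc ++ [acc.getLastD 0 + x]) (by simp)]
    simp [psums]

theorem psums_getD (l : List Int) : ∀ s : Int, ∀ i : Nat, i < l.length →
    (psums s l).getD i 0 = s + (l.take (i + 1)).sum := by
  induction l with
  | nil => intro s i hi; simp at hi
  | cons x xs ih =>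
    intro s i hi
    cases i with
    | zero => simp [psums]
    | succ i =>
      rw [psums, List.getD_cons_succ, ih (s + x) i (by simpa using hi)]
      simp [List.take_succ_cons]; ring

theorem pre_getD (a : List Int) (j : Nat) (hj : j ≤ a.length) :
    (a.foldl (fun acc x => acc ++ [acc.getLastD 0 + x]) [(0 : Int)]).getD j 0 = (a.take j).sum := by
  rw [foldl_psums a [(0 : Int)] (by simp)]
  cases j with
  | zero => simp
  | succ j =>
    have : ([(0 : Int)] ++ psums (List.getLastD [0] 0) a).getD (j + 1) 0
        = (psums (List.getLastD [(0 : Int)] 0) a).getD j 0 := by simp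
    rw [this]
    have h0 : List.getLastD [(0 : Int)] 0 = 0 := by simp
    rw [h0, psums_getD a 0 j (by omega)]
    ring

theorem getD_map_range (f : Nat → Int) (m i : Nat) (hi : i < m) :
    (((List.range m).map f).getD i 0) = f i := by
  rw [List.getD, List.getElem?_eq_getElem (by simpa using hi)]
  simp

theorem diag_map (a : List Int) : (List.range a.length).map (fun l => gspec a l l) = a := by
  apply List.ext_getElem
  · simp
  · intro i h1 h2
    simp only [List.getElem_map, List.getElem_range, gspec_diag, List.getD,
      List.getElem?_eq_getElem h2, Option.getD_some]

theorem outerB (a : List Int) (pre : List Int)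
    (hpre : ∀ j, j ≤ a.length → pre.getD j 0 = (a.take j).sum) :
    ∀ K, K + 1 ≤ a.length →
    (List.range' 1 K).foldl (fun cur k =>
      (List.range (a.length - k)).map (fun l =>
        pre.getD (l + k + 1) 0 - pre.getD l 0 -
          min (cur.getD (l + 1) 0) (cur.getD l 0))) a
    = (List.range (a.length - K)).map (fun l => gspec a l (l + K)) := by
  intro K
  induction K with
  | zero =>
    intro _
    rw [List.range'_zero, List.foldl_nil]
    simpa using (diag_map a).symm
  | succ K ih =>
    intro hK
    rw [List.range'_1_concat, List.foldl_append, List.foldl_cons, List.foldl_nil, ih (by omega),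
      Nat.add_comm 1 K]
    apply List.map_congr_left
    intro l hl
    rw [List.mem_range] at hl
    have hl' : l + (K + 1) < a.length := by omega
    rw [getD_map_range _ _ _ (by omega), getD_map_range _ _ _ (by omega)]
    rw [hpre (l + (K + 1) + 1) (by omega), hpre l (by omega)]
    rw [gspec_rec a l (l + (K + 1)) (by omega),
      show l + (K + 1) + 1 - l = K + 2 by omega,
      show l + (K + 1) + 1 = l + (K + 2) by omega,
      List.take_add, List.sum_append,
      show l + 1 + K = l + (K + 1) by omega,
      show l + (K + 1) - 1 = l + K by omega]
    ring

theorem mainA (a : List Int) (h : a ≠ []) :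
    get_max_gold a = gspec a 0 (a.length - 1) := by
  rw [get_max_gold, if_neg h]
  have hn : 0 < a.length := List.length_pos_iff.mpr h
  have := (outerA a (a.length - 1) (by omega)).2 0 (a.length - 1) (le_refl _) (by omega)
  simpa using this

theorem mainB (a : List Int) (h : a ≠ []) :
    get_max_gold_alt a = gspec a 0 (a.length - 1) := by
  have hn : 0 < a.length := List.length_pos_iff.mpr h
  rw [get_max_gold_alt]
  simp only [if_neg (by omega : ¬ a.length = 0)]
  rw [outerB a _ (fun j hj => pre_getD a j hj) (a.length - 1) (by omega)]
  rw [show a.length - (a.length - 1) = 1 by omega]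
  simp

-- ===== VERDICT (by name: the statement is the Claim_ definition above) =====
theorem get_max_gold_spec : Claim_equal_get_max_gold := by
  intro a _
  unfold Spec_get_max_gold
  by_cases h : a = []
  · subst h; rfl
  · rw [mainA a h, mainB a h]
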